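-- pv_equiv track=rewrite | github.com/trutadan/University-Work | Semester 1/Fundamentals of Programming/a2/main.py | find_common_sequences
-- ===== SOURCE A (Python) =====
-- def split_complex_numbers_into_parts(complex_numbers_list):
--     """Split the complex numbers into an array containing the real part of the numbers and
--     another one containing the imaginary part of the complex numbers."""
--
--     real_part_numbers = [real_part[0] for real_part in complex_numbers_list]
--     imaginary_part_numbers = [imaginary_part[1] for imaginary_part in complex_numbers_list]
--
--     return real_part_numbers, imaginary_part_numbers
--
-- def find_longest_sequence_for_given_sum(complex_numbers_list, given_sum):
--     """Find all the sequences which have the sum of the elements equal to a given sum."""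
--
--     # list with the tuples containing starting and finish index of all sequences
--     # for whose elements form the given sum
--     sequences_found = []
--
--     # sequences can start_program from the first element to the last but one
--     sequence_starting_index = 0
--
--     while sequence_starting_index < len(complex_numbers_list) - 1:
--         sequence_finish_index = sequence_starting_index + 1
--         sum_of_actual_sequence_elements = complex_numbers_list[sequence_starting_index]
--
--         while sequence_finish_index < len(complex_numbers_list):
--             sum_of_actual_sequence_elements += complex_numbers_list[sequence_finish_index]
--
--             if sum_of_actual_sequence_elements == given_sum:
--                 sequences_found.append((sequence_starting_index, sequence_finish_index))
--
--             sequence_finish_index += 1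
--
--         sequence_starting_index += 1
--
--     return sequences_found
--
-- def find_common_sequences(complex_numbers_list):
--     """Given two arrays with tuples check if there are any common tuples."""
--
--     common_real_imaginary_sum_sequences = []
--     real_part_numbers, imaginary_part_numbers = split_complex_numbers_into_parts(complex_numbers_list)
--
--     real_part_sequences = find_longest_sequence_for_given_sum(real_part_numbers, 10)
--     imaginary_part_sequences = find_longest_sequence_for_given_sum(imaginary_part_numbers, 10)
--
--     for real_part_sequence in real_part_sequences:
--         if real_part_sequence in imaginary_part_sequences:
--             common_real_imaginary_sum_sequences.append(real_part_sequence)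
--
--     return common_real_imaginary_sum_sequences
-- ===== SOURCE B (Python) =====
-- def find_common_sequences(complex_numbers_list):
--     """O(n^2): prefix sums of real and imaginary parts; a pair (i, j) is in the
--     answer iff both the real and the imaginary segment sums over [i, j] are 10."""
--     n = len(complex_numbers_list)
--     pre_r = [0]
--     pre_i = [0]
--     for r, im in complex_numbers_list:
--         pre_r.append(pre_r[-1] + r)
--         pre_i.append(pre_i[-1] + im)
--     return [(i, j)
--             for i in range(n)
--             for j in range(i + 1, n)
--             if pre_r[j + 1] - pre_r[i] == 10 and pre_i[j + 1] - pre_i[i] == 10]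
-- ===== Notes on version B (the rewrite author's own statement) =====
-- stated objective: faster
-- what changed: B computes prefix sums of the real and imaginary parts once and tests both segment-sum conditions in a single double loop over index pairs, instead of A's two separate quadratic sequence searches followed by a quadratic list-membership intersection (worst case O(n^4)).
import Mathlib
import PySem

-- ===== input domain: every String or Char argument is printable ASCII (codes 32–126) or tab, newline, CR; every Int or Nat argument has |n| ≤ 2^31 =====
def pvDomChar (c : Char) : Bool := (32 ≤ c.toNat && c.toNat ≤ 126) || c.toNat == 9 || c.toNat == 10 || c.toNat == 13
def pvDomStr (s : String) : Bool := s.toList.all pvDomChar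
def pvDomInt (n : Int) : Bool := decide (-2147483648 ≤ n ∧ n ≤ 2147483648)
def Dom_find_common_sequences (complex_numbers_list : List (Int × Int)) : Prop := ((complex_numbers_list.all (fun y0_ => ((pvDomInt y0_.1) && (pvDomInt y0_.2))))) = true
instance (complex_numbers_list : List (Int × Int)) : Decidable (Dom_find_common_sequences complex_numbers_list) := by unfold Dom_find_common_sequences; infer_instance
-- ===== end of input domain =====

-- B replaces A's two quadratic sequence searches plus a list intersection by membership
-- (worst case O(n^4)) by prefix sums and one double loop testing both parts at once (O(n^2)).

-- ===== PORT A =====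
-- split_complex_numbers_into_parts
def splitParts (l : List (Int × Int)) : List Int × List Int :=
  (l.map (fun p => p.1), l.map (fun p => p.2))

-- inner while loop of find_longest_sequence_for_given_sum (acc = running sum)
def seqInner (xs : List Int) (s : Int) (i : Nat) (j : Nat) (acc : Int)
    (res : List (Int × Int)) : List (Int × Int) :=
  if h : j < xs.length then
    seqInner xs s i (j + 1) (acc + xs[j])
      (if acc + xs[j] = s then res ++ [((i : Int), (j : Int))] else res)
  else res
termination_by xs.length - j

-- outer while loop of find_longest_sequence_for_given_sum
def seqOuter (xs : List Int) (s : Int) (i : Nat) (res : List (Int × Int)) : List (Int × Int) :=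
  if h : i + 1 < xs.length then
    seqOuter xs s (i + 1) (seqInner xs s i (i + 1) (xs[i]'(by omega)) res)
  else res
termination_by xs.length - i

def find_common_sequences (complex_numbers_list : List (Int × Int)) : List (Int × Int) :=
  let parts := splitParts complex_numbers_list
  let realSeqs := seqOuter parts.1 10 0 []
  let imagSeqs := seqOuter parts.2 10 0 []
  realSeqs.foldl (fun acc p => if p ∈ imagSeqs then acc ++ [p] else acc) []

-- ===== PORT B =====
-- Source B's prefix-sum list: [0, x0, x0+x1, …]
def scanSums : List Int → Int → List Int
  | [], acc => [acc]
  | x :: xs, acc => acc :: scanSums xs (acc + x)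

def find_common_sequences_alt (complex_numbers_list : List (Int × Int)) : List (Int × Int) :=
  let n := complex_numbers_list.length
  let preR := scanSums (complex_numbers_list.map (fun p => p.1)) 0
  let preI := scanSums (complex_numbers_list.map (fun p => p.2)) 0
  (List.range n).flatMap (fun i =>
    (List.range' (i + 1) (n - (i + 1))).filterMap (fun j =>
      if preR.getD (j + 1) 0 - preR.getD i 0 = 10 ∧ preI.getD (j + 1) 0 - preI.getD i 0 = 10
      then some ((i : Int), (j : Int)) else none))

-- ===== PRECONDITION & SPEC =====
def Spec_find_common_sequences (complex_numbers_list : List (Int × Int)) (out : List (Int × Int)) : Prop := out = find_common_sequences_alt complex_numbers_list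
instance (complex_numbers_list : List (Int × Int)) (out : List (Int × Int)) : Decidable (Spec_find_common_sequences complex_numbers_list out) := by unfold Spec_find_common_sequences; infer_instance

-- ===== CLAIM (what is proved, stated in full; the proofs are below) =====
def Claim_equal_find_common_sequences : Prop := ∀ (complex_numbers_list : List (Int × Int)), Dom_find_common_sequences complex_numbers_list → Spec_find_common_sequences complex_numbers_list (find_common_sequences complex_numbers_list)

-- ===== LEMMAS AND PROOFS =====

-- prefix sum of the first k elements
def P (xs : List Int) (k : Nat) : Int := (xs.take k).sum

theorem P_succ (xs : List Int) (k : Nat) (h : k < xs.length) :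
    P xs (k + 1) = P xs k + xs[k] := by
  unfold P
  rw [List.take_add_one, List.sum_append, List.getElem?_eq_getElem h]
  simp

theorem scanSums_getD (xs : List Int) (acc : Int) (k : Nat) (h : k ≤ xs.length) :
    (scanSums xs acc).getD k 0 = acc + P xs k := by
  induction xs generalizing acc k with
  | nil =>
    have hk : k = 0 := by simpa using h
    subst hk; simp [scanSums, P]
  | cons x xs ih =>
    cases k with
    | zero => simp [scanSums, P]
    | succ k =>
      simp only [scanSums, List.getD_cons_succ]
      rw [ih _ k (by simpa using h)]
      have : P (x :: xs) (k + 1) = x + P xs k := by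
        simp [P, List.take_succ_cons]
      rw [this]; ring

theorem seqInner_eq (xs : List Int) (s : Int) (i : Nat) :
    ∀ j acc res, j ≤ xs.length →
    seqInner xs s i j acc res = res ++
      (List.range' j (xs.length - j)).filterMap (fun j' =>
        if acc + (P xs (j' + 1) - P xs j) = s then some ((i : Int), (j' : Int)) else none) := by
  intro j
  induction hn : xs.length - j generalizing j with
  | zero =>
    intro acc res hj
    rw [seqInner]
    simp [show ¬ j < xs.length by omega]
  | succ m ih =>
    intro acc res hj
    have hjlt : j < xs.length := by omega
    rw [seqInner]
    simp only [hjlt, dif_pos]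
    rw [ih (j + 1) (by omega) _ _ (by omega)]
    rw [List.range'_succ]
    have hPj : P xs (j + 1) = P xs j + xs[j] := P_succ xs j hjlt
    have hcond : (acc + (P xs (j + 1) - P xs j) = s) ↔ (acc + xs[j] = s) := by
      rw [hPj]; constructor <;> intro h <;> linarith
    have hfun : (fun j' => if (acc + xs[j]) + (P xs (j' + 1) - P xs (j + 1)) = s
          then some ((i : Int), (j' : Int)) else none)
        = (fun j' => if acc + (P xs (j' + 1) - P xs j) = s
          then some ((i : Int), (j' : Int)) else none) := by
      funext j'
      have he : (acc + xs[j]) + (P xs (j' + 1) - P xs (j + 1))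
          = acc + (P xs (j' + 1) - P xs j) := by rw [hPj]; ring
      rw [he]
    rw [hfun]
    by_cases hc : acc + xs[j] = s
    · have h1 : acc + (P xs (j + 1) - P xs j) = s := hcond.mpr hc
      simp [hc, h1]
    · have h1 : ¬ acc + (P xs (j + 1) - P xs j) = s := fun h => hc (hcond.mp h)
      simp [hc, h1]

-- the full list produced by find_longest_sequence_for_given_sum
def segs (xs : List Int) (s : Int) : List (Int × Int) :=
  (List.range' 0 (xs.length - 1)).flatMap (fun i =>
    (List.range' (i + 1) (xs.length - (i + 1))).filterMap (fun j =>
      if P xs (j + 1) - P xs i = s then some ((i : Int), (j : Int)) else none))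

theorem seqOuter_eq (xs : List Int) (s : Int) :
    ∀ i res, seqOuter xs s i res = res ++
      (List.range' i (xs.length - 1 - i)).flatMap (fun i' =>
        (List.range' (i' + 1) (xs.length - (i' + 1))).filterMap (fun j =>
          if P xs (j + 1) - P xs i' = s then some ((i' : Int), (j : Int)) else none)) := by
  intro i
  induction hn : xs.length - 1 - i generalizing i with
  | zero =>
    intro res
    rw [seqOuter]
    simp [show ¬ i + 1 < xs.length by omega]
  | succ m ih =>
    intro res
    have hlt : i + 1 < xs.length := by omega
    rw [seqOuter]
    simp only [hlt, dif_pos]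
    rw [ih (i + 1) (by omega)]
    rw [seqInner_eq xs s i (i + 1) _ _ (by omega)]
    rw [List.range'_succ, List.flatMap_cons]
    have hPi : P xs (i + 1) = P xs i + xs[i]'(by omega) := P_succ xs i (by omega)
    have hfun : (fun j' => if (xs[i]'(by omega : i < xs.length)) + (P xs (j' + 1) - P xs (i + 1)) = s
          then some ((i : Int), (j' : Int)) else none)
        = (fun j' => if P xs (j' + 1) - P xs i = s
          then some ((i : Int), (j' : Int)) else none) := by
      funext j'
      have he : (xs[i]'(by omega : i < xs.length)) + (P xs (j' + 1) - P xs (i + 1))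
          = P xs (j' + 1) - P xs i := by rw [hPi]; ring
      rw [he]
    rw [hfun, List.append_assoc]

theorem segs_outer (xs : List Int) (s : Int) : seqOuter xs s 0 [] = segs xs s := by
  rw [seqOuter_eq]; simp [segs]

theorem mem_segs (xs : List Int) (s : Int) (i j : Nat)
    (hi : i + 1 ≤ j) (hj : j < xs.length) :
    (((i : Int), (j : Int)) ∈ segs xs s) ↔ P xs (j + 1) - P xs i = s := by
  unfold segs
  rw [List.mem_flatMap]
  constructor
  · rintro ⟨i', hi', hmem⟩
    rw [List.mem_filterMap] at hmem
    obtain ⟨j', hj', hopt⟩ := hmem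
    split at hopt
    · rename_i hc
      simp only [Option.some.injEq, Prod.mk.injEq, Int.natCast_inj] at hopt
      obtain ⟨h1, h2⟩ := hopt
      subst h1; subst h2; exact hc
    · exact absurd hopt (by simp)
  · intro hc
    refine ⟨i, ?_, ?_⟩
    · rw [List.mem_range'_1]; omega
    · rw [List.mem_filterMap]
      exact ⟨j, by rw [List.mem_range'_1]; omega, if_pos hc⟩

theorem filter_flatMap_list {α β : Type} (l : List α) (f : α → List β) (q : β → Bool) :
    (l.flatMap f).filter q = l.flatMap (fun a => (f a).filter q) := by
  induction l with
  | nil => simp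
  | cons x xs ih => simp [List.flatMap_cons, List.filter_append, ih]

theorem filter_filterMap_if {α β : Type} (l : List α) (c : α → Prop) [DecidablePred c]
    (v : α → β) (q : β → Bool) :
    (l.filterMap (fun a => if c a then some (v a) else none)).filter q
      = l.filterMap (fun a => if c a ∧ q (v a) = true then some (v a) else none) := by
  induction l with
  | nil => simp
  | cons x xs ih =>
    by_cases hc : c x
    · by_cases hq : q (v x) = true
      · rw [List.filterMap_cons_some (f := fun a => if c a then some (v a) else none) (if_pos hc),
          List.filterMap_cons_some (f := fun a => if c a ∧ q (v a) = true then some (v a) else none)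
            (if_pos ⟨hc, hq⟩)]
        simp [hq, ih]
      · rw [List.filterMap_cons_some (f := fun a => if c a then some (v a) else none) (if_pos hc),
          List.filterMap_cons_none (f := fun a => if c a ∧ q (v a) = true then some (v a) else none)
            (if_neg (fun h => hq h.2))]
        simp [hq, ih]
    · rw [List.filterMap_cons_none (f := fun a => if c a then some (v a) else none) (if_neg hc),
        List.filterMap_cons_none (f := fun a => if c a ∧ q (v a) = true then some (v a) else none)
          (if_neg (fun h => hc h.1))]
      exact ih

-- ===== VERDICT (by name: the statement is the Claim_ definition above) =====
theorem find_common_sequences_spec : Claim_equal_find_common_sequences := by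
  intro l _
  unfold Spec_find_common_sequences find_common_sequences find_common_sequences_alt splitParts
  simp only []
  set R := l.map (fun p => p.1) with hR
  set I := l.map (fun p => p.2) with hI
  have hRlen : R.length = l.length := by simp [hR]
  have hIlen : I.length = l.length := by simp [hI]
  rw [segs_outer, segs_outer,
    PySem.List.foldl_append_ite_eq_filter (fun p => p ∈ segs I 10), List.nil_append]
  have h1 : segs R 10 = (List.range' 0 (l.length - 1)).flatMap (fun i =>
      (List.range' (i + 1) (l.length - (i + 1))).filterMap (fun j =>
        if P R (j + 1) - P R i = 10 then some ((i : Int), (j : Int)) else none)) := by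
    unfold segs; rw [hRlen]
  rw [h1, filter_flatMap_list]
  -- B's side: prefix-list lookups become P-values
  have hcong : ∀ m, (List.range' 0 m).flatMap (fun i =>
        (List.range' (i + 1) (l.length - (i + 1))).filterMap (fun j =>
          if (scanSums R 0).getD (j + 1) 0 - (scanSums R 0).getD i 0 = 10 ∧
             (scanSums I 0).getD (j + 1) 0 - (scanSums I 0).getD i 0 = 10
          then some ((i : Int), (j : Int)) else none))
      = (List.range' 0 m).flatMap (fun i =>
        (List.range' (i + 1) (l.length - (i + 1))).filterMap (fun j =>
          if P R (j + 1) - P R i = 10 ∧ P I (j + 1) - P I i = 10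
          then some ((i : Int), (j : Int)) else none)) := by
    intro m
    apply List.flatMap_congr
    intro i _
    apply List.filterMap_congr
    intro j hj
    rw [List.mem_range'_1] at hj
    have hjl : j < l.length := by omega
    have hil : i ≤ l.length := by omega
    rw [scanSums_getD R 0 (j + 1) (by omega), scanSums_getD R 0 i (by omega),
      scanSums_getD I 0 (j + 1) (by omega), scanSums_getD I 0 i (by omega)]
    simp only [Int.zero_add]
  rw [List.range_eq_range', hcong]
  -- B's range n: its last index n-1 contributes an empty inner range
  have hdrop : (List.range' 0 l.length).flatMap (fun i =>
        (List.range' (i + 1) (l.length - (i + 1))).filterMap (fun j =>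
          if P R (j + 1) - P R i = 10 ∧ P I (j + 1) - P I i = 10
          then some ((i : Int), (j : Int)) else none))
      = (List.range' 0 (l.length - 1)).flatMap (fun i =>
        (List.range' (i + 1) (l.length - (i + 1))).filterMap (fun j =>
          if P R (j + 1) - P R i = 10 ∧ P I (j + 1) - P I i = 10
          then some ((i : Int), (j : Int)) else none)) := by
    cases hl : l.length with
    | zero => simp
    | succ m =>
      rw [List.range'_concat, List.flatMap_append]
      simp
  rw [hdrop]
  -- elementwise on the real side: the membership test is the imaginary sum condition
  apply List.flatMap_congr
  intro i hi
  rw [List.mem_range'_1] at hi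
  rw [filter_filterMap_if]
  apply List.filterMap_congr
  intro j hj
  rw [List.mem_range'_1] at hj
  have hjl : j < l.length := by omega
  have hmem : (((i : Int), (j : Int)) ∈ segs I 10) ↔ P I (j + 1) - P I i = 10 :=
    mem_segs I 10 i j (by omega) (by rw [hIlen]; omega)
  by_cases hr : P R (j + 1) - P R i = 10
  · by_cases him : P I (j + 1) - P I i = 10
    · rw [if_pos ⟨hr, by simp [hmem.mpr him]⟩, if_pos ⟨hr, him⟩]
    · rw [if_neg (fun h => him (hmem.mp (by simpa using h.2))),
        if_neg (fun h => him h.2)]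
  · rw [if_neg (fun h => hr h.1), if_neg (fun h => hr h.1)]
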